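-- pv_equiv track=rewrite | github.com/matias1405/ejercicios_python | Clase02/diccionario_geringoso.py | diccionario_geriongoso
-- ===== SOURCE A (Python) =====
-- def diccionario_geriongoso(lista):
--     diccionario={}
--     for palabra in lista:
--         palabra_geringoso = ""
--         for c in palabra:
--             palabra_geringoso += c
--             if c in 'aeiouAEIOU':
--                 palabra_geringoso += "p" + c
--         diccionario[palabra] = palabra_geringoso
--     return diccionario
-- ===== SOURCE B (Python) =====
-- def diccionario_geriongoso(lista):
--     def geringoso(p):
--         for v in 'aeiouAEIOU':
--             p = p.replace(v, v + 'p' + v)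
--         return p
--     pares = [(w, geringoso(w)) for w in dict.fromkeys(lista)]
--     return dict(pares)
-- ===== Notes on version B (the rewrite author's own statement) =====
-- stated objective: alternative
-- what changed: Instead of A's single pass that inserts every word (overwriting duplicates) into a dict while building each value char-by-char, B first deduplicates the word list keeping first occurrences (dict.fromkeys), computes each value by ten whole-string vowel replace passes, and constructs the dict once from the ready pair list; outputs coincide because the value depends only on the word, so overwriting with duplicates changes nothing.
import Mathlib
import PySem

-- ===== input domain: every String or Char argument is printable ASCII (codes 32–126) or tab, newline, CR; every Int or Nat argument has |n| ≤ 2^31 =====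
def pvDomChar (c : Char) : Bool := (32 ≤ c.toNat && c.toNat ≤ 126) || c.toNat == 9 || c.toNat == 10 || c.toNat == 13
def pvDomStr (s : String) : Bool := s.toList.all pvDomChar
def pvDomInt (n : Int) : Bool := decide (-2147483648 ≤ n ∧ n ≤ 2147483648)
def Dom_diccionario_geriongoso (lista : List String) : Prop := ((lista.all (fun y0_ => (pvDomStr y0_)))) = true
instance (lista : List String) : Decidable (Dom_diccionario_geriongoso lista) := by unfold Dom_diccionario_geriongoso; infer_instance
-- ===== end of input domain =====

-- B deduplicates the word list first (first occurrences) and builds the dict once from a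
-- ready pair list whose values come from ten whole-string vowel replace passes, instead of
-- A's insert-with-overwrite loop building each value char by char; same output (alternative).


-- ===== PORT A =====
-- inner loop of A: palabra_geringoso += c; if c in 'aeiouAEIOU': palabra_geringoso += 'p' + c
def pvInnerA (palabra : String) : String :=
  String.ofList (palabra.toList.foldl (fun acc c =>
    let acc1 := acc ++ [c]
    if PySem.Chars.isIn [c] "aeiouAEIOU".toList then acc1 ++ ['p', c] else acc1) [])

def diccionario_geriongoso (lista : List String) : List (String × String) :=
  (lista.foldl (fun d palabra => d.insert palabra (pvInnerA palabra))
    (PySem.Dict.mk ([] : List (String × String)))).items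

-- ===== PORT B =====
-- geringoso(p): for v in 'aeiouAEIOU': p = p.replace(v, v+'p'+v)
def pvGeringosoB (p : String) : String :=
  String.ofList ("aeiouAEIOU".toList.foldl
    (fun s v => PySem.Chars.replace s [v] [v, 'p', v]) p.toList)

-- pares = [(w, geringoso(w)) for w in dict.fromkeys(lista)]; dict(pares) — the pair keys are
-- distinct (dedup), so dict(pares).items is the pair list itself.
def diccionario_geriongoso_alt (lista : List String) : List (String × String) :=
  (PySem.Dict.mk ((PySem.List.dedup lista).map (fun w => (w, pvGeringosoB w)))).items

-- ===== PRECONDITION & SPEC =====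
def Spec_diccionario_geriongoso (lista : List String) (out : List (String × String)) : Prop := out = diccionario_geriongoso_alt lista
instance (lista : List String) (out : List (String × String)) : Decidable (Spec_diccionario_geriongoso lista out) := by unfold Spec_diccionario_geriongoso; infer_instance

-- ===== CLAIM (what is proved, stated in full; the proofs are below) =====
def Claim_equal_diccionario_geriongoso : Prop := ∀ (lista : List String), Dom_diccionario_geriongoso lista → Spec_diccionario_geriongoso lista (diccionario_geriongoso lista)

-- ===== LEMMAS AND PROOFS =====

-- the geringoso expansion of one character
def pvF (c : Char) : List Char :=
  if c ∈ ['a','e','i','o','u','A','E','I','O','U'] then [c, 'p', c] else [c]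

lemma pv_go_single (v : Char) (new : List Char) :
    ∀ (l : List Char) (fuel : Nat) (acc : List Char), l.length ≤ fuel →
      PySem.Chars.replace.go [v] new fuel l acc
        = acc.reverse ++ l.flatMap (fun c => if c = v then new else [c]) := by
  intro l
  induction l with
  | nil =>
    intro fuel acc _
    cases fuel <;> simp [PySem.Chars.replace.go]
  | cons c t ih =>
    intro fuel acc h
    cases fuel with
    | zero => simp at h
    | succ m =>
      have hm : t.length ≤ m := by simpa using h
      by_cases hc : v = c
      · subst hc
        simp only [PySem.Chars.replace.go]
        rw [if_pos (by simp [List.isPrefixOf])]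
        have hdrop : List.drop [v].length (v :: t) = t := rfl
        rw [hdrop, ih m _ hm]
        simp
      · simp only [PySem.Chars.replace.go]
        rw [if_neg (by simp [List.isPrefixOf, hc])]
        rw [ih m _ hm]
        simp [Ne.symm hc]

lemma pv_repl_single (l : List Char) (v : Char) (new : List Char) :
    PySem.Chars.replace l [v] new = l.flatMap (fun c => if c = v then new else [c]) := by
  simpa [PySem.Chars.replace] using pv_go_single v new l l.length [] le_rfl

-- one pass over the vowel string, as a named step
def pvStepAll (l : List Char) : List Char :=
  "aeiouAEIOU".toList.foldl (fun s v => PySem.Chars.replace s [v] [v, 'p', v]) l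

lemma pvStepAll_append (l1 l2 : List Char) :
    pvStepAll (l1 ++ l2) = pvStepAll l1 ++ pvStepAll l2 := by
  simp [pvStepAll, List.foldl, pv_repl_single, List.flatMap_append]

lemma pvStepAll_single (c : Char) : pvStepAll [c] = pvF c := by
  by_cases h1 : c = 'a'; · subst h1; decide
  by_cases h2 : c = 'e'; · subst h2; decide
  by_cases h3 : c = 'i'; · subst h3; decide
  by_cases h4 : c = 'o'; · subst h4; decide
  by_cases h5 : c = 'u'; · subst h5; decide
  by_cases h6 : c = 'A'; · subst h6; decide
  by_cases h7 : c = 'E'; · subst h7; decide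
  by_cases h8 : c = 'I'; · subst h8; decide
  by_cases h9 : c = 'O'; · subst h9; decide
  by_cases h10 : c = 'U'; · subst h10; decide
  simp [pvStepAll, List.foldl, pv_repl_single, pvF, h1, h2, h3, h4, h5, h6, h7, h8, h9, h10]

lemma pvStepAll_eq_flatMap (l : List Char) : pvStepAll l = l.flatMap pvF := by
  induction l with
  | nil => decide
  | cons c t ih =>
    have : pvStepAll (c :: t) = pvStepAll [c] ++ pvStepAll t := by
      simpa using pvStepAll_append [c] t
    simp [this, pvStepAll_single, ih]

lemma pv_innerA_flat (l : List Char) :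
    ∀ acc : List Char,
      l.foldl (fun acc c =>
        let acc1 := acc ++ [c]
        if PySem.Chars.isIn [c] "aeiouAEIOU".toList then acc1 ++ ['p', c] else acc1) acc
        = acc ++ l.flatMap pvF := by
  induction l with
  | nil => intro acc; simp
  | cons c t ih =>
    intro acc
    rw [List.foldl_cons, ih]
    have hmem : PySem.Chars.isIn [c] "aeiouAEIOU".toList
        = decide (c ∈ ['a','e','i','o','u','A','E','I','O','U']) := by
      by_cases h : c ∈ ['a','e','i','o','u','A','E','I','O','U']
      · fin_cases h <;> decide
      · rw [decide_eq_false h, PySem.Chars.isIn_eq_false_iff]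
        intro hinf
        exact h (by simpa using hinf.subset (by simp))
    show (if PySem.Chars.isIn [c] "aeiouAEIOU".toList = true then (acc ++ [c]) ++ ['p', c]
        else acc ++ [c]) ++ List.flatMap pvF t = acc ++ List.flatMap pvF (c :: t)
    rw [hmem]
    by_cases h : c ∈ ['a','e','i','o','u','A','E','I','O','U'] <;>
      simp [h, pvF]

lemma pv_inner_eq (p : String) : pvInnerA p = pvGeringosoB p := by
  unfold pvInnerA pvGeringosoB
  rw [pv_innerA_flat p.toList []]
  rw [show ("aeiouAEIOU".toList.foldl
      (fun s v => PySem.Chars.replace s [v] [v, 'p', v]) p.toList) = pvStepAll p.toList from rfl]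
  rw [pvStepAll_eq_flatMap]
  rfl

-- in A's loop the value inserted depends only on the key, so any lookup is f of the key
lemma pv_getD_fold (f : String → String) (l : List String) :
    ∀ (d : PySem.Dict String String) (k : String) (d0 : String),
      (l.foldl (fun d w => d.insert w (f w)) d).getD k d0
        = if k ∈ l then f k else d.getD k d0 := by
  induction l with
  | nil => intro d k d0; simp
  | cons w t ih =>
    intro d k d0
    rw [List.foldl_cons, ih]
    by_cases ht : k ∈ t
    · simp [ht]
    · by_cases hw : k = w
      · subst hw; simp [ht, PySem.Dict.getD_insert_self]
      · simp [ht, hw, PySem.Dict.getD_insert]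

-- ===== VERDICT (by name: the statement is the Claim_ definition above) =====
theorem diccionario_geriongoso_spec : Claim_equal_diccionario_geriongoso := by
  intro lista _
  unfold Spec_diccionario_geriongoso diccionario_geriongoso diccionario_geriongoso_alt
  set F := fun (d : PySem.Dict String String) (w : String) => d.insert w (pvInnerA w) with hF
  have hnd : (lista.foldl F (PySem.Dict.mk [])).keys.Nodup :=
    PySem.Dict.nodup_keys_foldl_insert lista _ _ PySem.Dict.nodup_keys_empty
  have hkeys : (lista.foldl F (PySem.Dict.mk [])).keys = PySem.List.dedup lista := by
    rw [hF, PySem.Dict.keys_foldl_insert]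
    simp [PySem.Set.update, PySem.Set.ofList_eq_foldl]
  rw [PySem.Dict.items_eq_map_keys _ hnd "", hkeys]
  have hitems : (PySem.Dict.mk ((PySem.List.dedup lista).map
      (fun w => (w, pvGeringosoB w)))).items
      = (PySem.List.dedup lista).map (fun w => (w, pvGeringosoB w)) := rfl
  rw [hitems]
  apply List.map_congr_left
  intro k hk
  have hmem : k ∈ lista := (PySem.List.mem_dedup lista k).mp hk
  rw [hF, pv_getD_fold pvInnerA lista _ k ""]
  simp [hmem, pv_inner_eq]
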